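-- pv_equiv track=rewrite | github.com/wxdangel-ship-it/nav-road-pipeline | scripts/run_image_stage12_sparse_seed_0010_f000_500.py | _segment_count
-- ===== SOURCE A (Python) =====
-- from typing import Dict, List, Optional, Tuple
--
-- def _segment_count(mask_flags: List[int]) -> int:
--     count = 0
--     in_seg = False
--     for v in mask_flags:
--         if v and not in_seg:
--             count += 1
--             in_seg = True
--         elif not v:
--             in_seg = False
--     return count
-- ===== SOURCE B (Python) =====
-- def _segment_count(mask_flags):
--     def runs(lo, hi):
--         if hi - lo == 0:
--             return 0
--         if hi - lo == 1:
--             return 1 if mask_flags[lo] else 0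
--         mid = (lo + hi) // 2
--         c = runs(lo, mid) + runs(mid, hi)
--         if mask_flags[mid - 1] and mask_flags[mid]:
--             c -= 1  # a truthy run crosses the split: counted once on each side
--         return c
--     return runs(0, len(mask_flags))
-- ===== Notes on version B (the rewrite author's own statement) =====
-- stated objective: alternative
-- what changed: Replaces the left-to-right scan with an in_seg flag by a divide-and-conquer recursion: split the index range in half, count runs in each half independently, and subtract one when a truthy run crosses the split boundary.
import Mathlib
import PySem

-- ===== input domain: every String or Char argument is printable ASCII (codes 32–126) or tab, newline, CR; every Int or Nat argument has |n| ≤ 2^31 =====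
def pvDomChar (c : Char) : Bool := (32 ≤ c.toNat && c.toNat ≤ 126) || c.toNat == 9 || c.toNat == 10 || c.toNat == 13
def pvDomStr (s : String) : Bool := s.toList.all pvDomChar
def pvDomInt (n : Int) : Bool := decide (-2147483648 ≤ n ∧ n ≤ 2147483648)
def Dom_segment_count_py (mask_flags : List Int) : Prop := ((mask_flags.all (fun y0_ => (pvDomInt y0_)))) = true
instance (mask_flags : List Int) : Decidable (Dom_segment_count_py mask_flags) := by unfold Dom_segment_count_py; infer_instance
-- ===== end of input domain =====

-- B replaces A's sequential in_seg flag-scan by a divide-and-conquer recursion: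
-- count runs in each half and subtract one when a truthy run crosses the split (alternative).

-- ===== PORT A =====
-- literal port of A's loop: state (count, in_seg), same branch order
def segment_count_py (mask_flags : List Int) : Int :=
  (mask_flags.foldl (fun (st : Int × Bool) v =>
      if v ≠ 0 ∧ ¬ st.2 then (st.1 + 1, true)
      else if v = 0 then (st.1, false)
      else st) (0, false)).1

-- ===== PORT B =====
-- runs(lo, hi) of Source B, on the sublist mask_flags[lo:hi]; the half split mid = (lo+hi)//2
-- becomes take/drop at length/2, mask_flags[mid-1] / mask_flags[mid] become getLastD/headD
def pvRuns : List Int → Int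
  | [] => 0
  | [v] => if v ≠ 0 then 1 else 0
  | v :: u :: t =>
      let l := v :: u :: t
      let mid := l.length / 2
      let L := l.take mid
      let R := l.drop mid
      pvRuns L + pvRuns R -
        (if L.getLastD 0 ≠ 0 ∧ R.headD 0 ≠ 0 then 1 else 0)
termination_by l => l.length
decreasing_by
  · simp only [List.length_take, List.length_cons]
    omega
  · simp only [List.length_drop, List.length_cons]
    omega

def segment_count_py_alt (mask_flags : List Int) : Int := pvRuns mask_flags

-- ===== PRECONDITION & SPEC =====
def Spec_segment_count_py (mask_flags : List Int) (out : Int) : Prop := out = segment_count_py_alt mask_flags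
instance (mask_flags : List Int) (out : Int) : Decidable (Spec_segment_count_py mask_flags out) := by unfold Spec_segment_count_py; infer_instance

-- ===== CLAIM (what is proved, stated in full; the proofs are below) =====
def Claim_equal_segment_count_py : Prop := ∀ (mask_flags : List Int), Dom_segment_count_py mask_flags → Spec_segment_count_py mask_flags (segment_count_py mask_flags)

-- ===== LEMMAS AND PROOFS =====

-- common spec: count of truthy-run starts, with state s = "previous element truthy"
def pvStarts (s : Bool) : List Int → Int
  | [] => 0
  | v :: t => (if v ≠ 0 ∧ ¬ s then 1 else 0) + pvStarts (decide (v ≠ 0)) t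

theorem foldlA_eq_starts (l : List Int) (c : Int) (s : Bool) :
    (l.foldl (fun (st : Int × Bool) v =>
      if v ≠ 0 ∧ ¬ st.2 then (st.1 + 1, true)
      else if v = 0 then (st.1, false)
      else st) (c, s)).1 = c + pvStarts s l := by
  induction l generalizing c s with
  | nil => simp [pvStarts]
  | cons v t ih =>
      simp only [List.foldl_cons]
      by_cases hv : v = 0
      · rw [if_neg (by simp [hv]), if_pos hv, ih, pvStarts]
        simp [hv]
      · by_cases hs : s
        · rw [if_neg (by simp [hs]), if_neg hv, ih, pvStarts]
          simp [hv, hs]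
        · rw [if_pos ⟨hv, by simp [hs]⟩, ih, pvStarts]
          simp only [hs]
          simp [hv]
          ring

-- truthiness of the last element of A, starting state s if A is empty
def pvEnd (s : Bool) (A : List Int) : Bool := A.foldl (fun _ v => decide (v ≠ 0)) s

theorem starts_append (A B : List Int) (s : Bool) :
    pvStarts s (A ++ B) = pvStarts s A + pvStarts (pvEnd s A) B := by
  induction A generalizing s with
  | nil => simp [pvStarts, pvEnd]
  | cons v t ih =>
      simp only [List.cons_append, pvStarts, pvEnd, List.foldl_cons] at *
      rw [ih]
      ring

theorem pvEnd_getLastD (A : List Int) (s : Bool) (h : A ≠ []) :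
    pvEnd s A = decide (A.getLastD 0 ≠ 0) := by
  induction A generalizing s with
  | nil => exact absurd rfl h
  | cons v t ih =>
      cases t with
      | nil => simp [pvEnd]
      | cons u r =>
          simp only [pvEnd, List.foldl_cons] at *
          rw [ih (decide (v ≠ 0)) (by simp)]
          rfl

theorem starts_true (B : List Int) :
    pvStarts true B = pvStarts false B - (if B.headD 0 ≠ 0 then 1 else 0) := by
  cases B with
  | nil => simp [pvStarts]
  | cons v t =>
      by_cases hv : v = 0
      · simp [pvStarts, hv]
      · simp [pvStarts, hv]

theorem pvRuns_eq_starts (l : List Int) : pvRuns l = pvStarts false l := by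
  induction l using pvRuns.induct with
  | case1 => simp [pvRuns, pvStarts]
  | case2 v hv => simp [pvRuns, pvStarts, hv]
  | case3 v hv => simp [pvRuns, pvStarts, hv]
  | case4 v u t _l _mid _L _R ihL ihR =>
      rw [pvRuns]
      set l : List Int := v :: u :: t with hl
      set mid : Nat := l.length / 2 with hm
      set L : List Int := l.take mid with hLdef
      set R : List Int := l.drop mid with hRdef
      have hlen : l.length = t.length + 2 := by simp [l]
      have hmid1 : 1 ≤ mid := by simp only [mid, hlen]; omega
      have hmidlt : mid < l.length := by simp only [mid, hlen] at *; omega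
      have hL : L ≠ [] := by
        have : L.length = mid := by simp [L, List.length_take]; omega
        intro h; rw [h] at this; simp at this; omega
      have hR : R ≠ [] := by
        have : R.length = l.length - mid := by simp [R]
        intro h; rw [h] at this; simp at this; omega
      have hsplit : L ++ R = l := List.take_append_drop _ _
      have key : pvStarts false l = pvStarts false L + pvStarts (pvEnd false L) R := by
        rw [← hsplit, starts_append]
      rw [pvEnd_getLastD L false hL] at key
      rw [ihL, ihR, key]
      by_cases hlast : L.getLastD 0 ≠ 0
      · rw [decide_eq_true hlast]
        rw [starts_true R]
        by_cases hhead : R.headD 0 ≠ 0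
        · rw [if_pos ⟨hlast, hhead⟩, if_pos hhead]; ring
        · rw [if_neg (by tauto), if_neg hhead]; ring
      · rw [decide_eq_false hlast]
        rw [if_neg (by tauto)]
        ring

-- ===== VERDICT (by name: the statement is the Claim_ definition above) =====
theorem segment_count_py_spec : Claim_equal_segment_count_py := by
  intro l _
  unfold Spec_segment_count_py segment_count_py segment_count_py_alt
  rw [foldlA_eq_starts, pvRuns_eq_starts]
  ring
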